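-- pv_equiv track=rewrite | github.com/kchaz/MScDissertation_Public | src/func/EdaHelper.py | lang_breakdown
-- ===== SOURCE A (Python) =====
-- def lang_breakdown(langs):
--     """
--
--     Parameters
--     ----------
--     langs : list or np array containing language codes
--     written to process output of abstract_languages() function
--
--     Returns
--     -------
--     tuple containing
--         0. number of english abstracts
--         1. number of non-english abstracts
--         2. number of NA abstracts
--         3. list of english indices
--         4. list of non-english indices
--         5. list of NA indices
--         6  bool for whether there are any "error" entries
--
--     """
--     n = len(langs)
--
--     en_list = []
--     na_list = []
--     not_en_list = []
--     error_count = 0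
--
--     for j in range(0,n):
--         if langs[j] == "en":
--             en_list.append(j)
--         elif langs[j] is None:
--             na_list.append(j)
--         elif langs[j] == "error":
--             error_count +=1
--         else:
--             not_en_list.append(j)
--
--     num_en = len(en_list)
--     num_na = len(na_list)
--     num_not_en = len(not_en_list)
--
--     return(num_en, num_not_en, num_na,
--            en_list, not_en_list, na_list,
--            error_count)
-- ===== SOURCE B (Python) =====
-- def lang_breakdown(langs):
--     en_list = [j for j, l in enumerate(langs) if l == "en"]
--     na_list = [j for j, l in enumerate(langs) if l is None]
--     not_en_list = [j for j, l in enumerate(langs)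
--                    if l is not None and l != "en" and l != "error"]
--     error_count = sum(1 for l in langs if l == "error")
--     return (len(en_list), len(not_en_list), len(na_list),
--             en_list, not_en_list, na_list,
--             error_count)
-- ===== Notes on version B (the rewrite author's own statement) =====
-- stated objective: alternative
-- what changed: Replaced the single if/elif/else classifying loop with four independent filtered passes (three index comprehensions over enumerate and a generator sum for the error count), deriving the counts from the list lengths.
import Mathlib
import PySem

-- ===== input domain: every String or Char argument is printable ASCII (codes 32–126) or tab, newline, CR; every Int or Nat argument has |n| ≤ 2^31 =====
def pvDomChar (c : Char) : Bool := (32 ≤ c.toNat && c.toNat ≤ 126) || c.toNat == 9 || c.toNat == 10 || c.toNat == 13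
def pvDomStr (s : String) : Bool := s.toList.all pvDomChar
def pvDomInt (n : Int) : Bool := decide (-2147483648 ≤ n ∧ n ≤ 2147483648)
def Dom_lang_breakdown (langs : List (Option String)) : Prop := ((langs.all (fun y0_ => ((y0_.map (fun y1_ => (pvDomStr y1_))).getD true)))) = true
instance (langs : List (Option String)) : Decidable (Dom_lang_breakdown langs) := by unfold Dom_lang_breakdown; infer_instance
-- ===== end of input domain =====

-- B replaces A's single if/elif/else classifying loop with independent filtered passes
-- (index comprehensions over enumerate plus a count of "error" entries); same cost, same result.

-- ===== PORT A =====
-- classify langs[j] with the if/elif chain, on the pair (index, element)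
def pvStepA (st : List Int × List Int × List Int × Int) (p : Int × Option String) :
    List Int × List Int × List Int × Int :=
  let (en_list, na_list, not_en_list, error_count) := st
  if p.2 == some "en" then (en_list ++ [p.1], na_list, not_en_list, error_count)
  else if p.2 == none then (en_list, na_list ++ [p.1], not_en_list, error_count)
  else if p.2 == some "error" then (en_list, na_list, not_en_list, error_count + 1)
  else (en_list, na_list, not_en_list ++ [p.1], error_count)

-- one loop 'for j in range(0, n)', classifying langs[j] into the four accumulators
def lang_breakdown (langs : List (Option String)) : Int × Int × Int × List Int × List Int × List Int × Int :=
  let n : Int := PySem.List.len langs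
  let st :=
    (PySem.List.pyRange 0 n 1).foldl
      (fun st j => pvStepA st (j, PySem.List.pyGetD langs j none))
      ([], [], [], 0)
  let (en_list, na_list, not_en_list, error_count) := st
  ((en_list.length : Int), (not_en_list.length : Int), (na_list.length : Int),
   en_list, not_en_list, na_list, error_count)

-- ===== PORT B =====
-- independent filtered passes: three index comprehensions over enumerate(langs) and a count of "error"s
def lang_breakdown_alt (langs : List (Option String)) : Int × Int × Int × List Int × List Int × List Int × Int :=
  let en_list := ((PySem.List.enumerate langs 0).filter (fun p => p.2 == some "en")).map (·.1)
  let na_list := ((PySem.List.enumerate langs 0).filter (fun p => p.2 == none)).map (·.1)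
  let not_en_list := ((PySem.List.enumerate langs 0).filter
      (fun p => !(p.2 == none) && !(p.2 == some "en") && !(p.2 == some "error"))).map (·.1)
  let error_count : Int := (langs.countP (fun l => l == some "error") : Int)
  ((en_list.length : Int), (not_en_list.length : Int), (na_list.length : Int),
   en_list, not_en_list, na_list, error_count)

-- ===== PRECONDITION & SPEC =====
def Spec_lang_breakdown (langs : List (Option String)) (out : Int × Int × Int × List Int × List Int × List Int × Int) : Prop := out = lang_breakdown_alt langs
instance (langs : List (Option String)) (out : Int × Int × Int × List Int × List Int × List Int × Int) : Decidable (Spec_lang_breakdown langs out) := by unfold Spec_lang_breakdown; infer_instance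

-- ===== CLAIM (what is proved, stated in full; the proofs are below) =====
def Claim_equal_lang_breakdown : Prop := ∀ (langs : List (Option String)), Dom_lang_breakdown langs → Spec_lang_breakdown langs (lang_breakdown langs)

-- ===== LEMMAS AND PROOFS =====

-- A's index loop is the same fold taken over enumerate(langs)
theorem foldlA_enum (langs : List (Option String)) (init : List Int × List Int × List Int × Int) :
    (PySem.List.pyRange 0 (PySem.List.len langs) 1).foldl
      (fun st j => pvStepA st (j, PySem.List.pyGetD langs j none)) init
    = (PySem.List.enumerate langs 0).foldl pvStepA init := by
  rw [PySem.List.enumerate_eq_map_pyRange (xs := langs) (d := none), List.foldl_map]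

-- A's classifying fold over any enumerated list, with arbitrary accumulators,
-- equals B's three filters plus the error count.
theorem loopA_eq (L : List (Int × Option String)) (e na ne : List Int) (c : Int) :
    L.foldl pvStepA (e, na, ne, c)
    = (e ++ (L.filter (fun p => p.2 == some "en")).map (·.1),
       na ++ (L.filter (fun p => p.2 == none)).map (·.1),
       ne ++ (L.filter (fun p => !(p.2 == none) && !(p.2 == some "en") && !(p.2 == some "error"))).map (·.1),
       c + (L.countP (fun p => p.2 == some "error") : Int)) := by
  induction L generalizing e na ne c with
  | nil => simp
  | cons p L ih =>
    obtain ⟨j, l⟩ := p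
    rw [List.foldl_cons]
    by_cases h1 : l = some "en"
    · have hs : pvStepA (e, na, ne, c) (j, l) = (e ++ [j], na, ne, c) := by
        simp [pvStepA, h1]
      rw [hs, ih]
      simp [h1]
    · by_cases h2 : l = none
      · have hs : pvStepA (e, na, ne, c) (j, l) = (e, na ++ [j], ne, c) := by
          simp [pvStepA, h2]
        rw [hs, ih]
        simp [h2]
      · obtain ⟨s, rfl⟩ := Option.ne_none_iff_exists'.mp h2
        have h1' : s ≠ "en" := by intro h; exact h1 (by rw [h])
        by_cases h3 : s = "error"
        · have hs : pvStepA (e, na, ne, c) (j, some s) = (e, na, ne, c + 1) := by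
            simp [pvStepA, h3]
          rw [hs, ih]
          simp [h3]
          ring
        · have hs : pvStepA (e, na, ne, c) (j, some s) = (e, na, ne ++ [j], c) := by
            simp [pvStepA, h1', h3]
          rw [hs, ih]
          simp [h1', h3]

-- the error count over langs equals the error count over enumerate(langs)
theorem countP_enum (langs : List (Option String)) :
    ((PySem.List.enumerate langs 0).countP (fun p => p.2 == some "error") : Int)
    = (langs.countP (fun l => l == some "error") : Int) := by
  conv_rhs => rw [← PySem.List.map_snd_enumerate (xs := langs) (s := 0)]
  rw [List.countP_map]
  norm_num
  exact List.countP_congr (fun p _ => Iff.rfl)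

-- ===== VERDICT (by name: the statement is the Claim_ definition above) =====
theorem lang_breakdown_spec : Claim_equal_lang_breakdown := by
  intro langs _
  show lang_breakdown langs = lang_breakdown_alt langs
  unfold lang_breakdown lang_breakdown_alt
  simp only [foldlA_enum, loopA_eq, List.nil_append, zero_add, countP_enum]
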